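-- pv_equiv track=rewrite | github.com/mdevn001/172Project | robot.py | encode_reserved
-- ===== SOURCE A (Python) =====
-- def encode_reserved(str):
--     reserved_characters  = ['&',' ']
--     for char in reserved_characters:
--         if(char == '&'):
--             str = str.replace(char,'%26')
--         else:
--             if(char ==' '):
--                 str =  str.replace(char,'%20')
--     return str
-- ===== SOURCE B (Python) =====
-- def encode_reserved(str):
--     mapping = {'&': '%26', ' ': '%20'}
--     return ''.join(mapping.get(ch, ch) for ch in str)
-- ===== Notes on version B (the rewrite author's own statement) =====
-- stated objective: idiomatic
-- what changed: Replaces the loop over reserved characters with two sequential str.replace passes by a single character-by-character pass that joins lookups in a small translation dict.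
import Mathlib
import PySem

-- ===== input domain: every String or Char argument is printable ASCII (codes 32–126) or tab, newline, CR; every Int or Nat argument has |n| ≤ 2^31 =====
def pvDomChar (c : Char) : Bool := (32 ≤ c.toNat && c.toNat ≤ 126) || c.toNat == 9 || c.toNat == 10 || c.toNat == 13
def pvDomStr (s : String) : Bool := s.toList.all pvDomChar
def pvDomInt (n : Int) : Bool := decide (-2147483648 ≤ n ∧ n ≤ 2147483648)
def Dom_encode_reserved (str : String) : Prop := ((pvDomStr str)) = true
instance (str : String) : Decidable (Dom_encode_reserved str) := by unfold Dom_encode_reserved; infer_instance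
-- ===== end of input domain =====

-- B replaces A's two sequential str.replace passes with one idiomatic character-by-character
-- pass over the string joining lookups in a small translation table.


-- ===== PORT A =====
-- A loops over the list of reserved characters and applies str.replace for each branch.
def encode_reserved (str : String) : String :=
  (['&', ' '] : List Char).foldl (fun s char =>
    if char = '&' then PySem.Str.replace s "&" "%26"
    else if char = ' ' then PySem.Str.replace s " " "%20"
    else s) str

-- ===== PORT B =====
-- B builds a translation dict and joins per-character lookups in one pass.
def encode_reserved_alt (str : String) : String :=
  let mapping : PySem.Dict Char String :=
    (PySem.Dict.empty.insert '&' "%26").insert ' ' "%20"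
  PySem.Str.join "" (str.toList.map (fun ch => mapping.getD ch (String.ofList [ch])))

-- ===== PRECONDITION & SPEC =====
def Spec_encode_reserved (str : String) (out : String) : Prop := out = encode_reserved_alt str
instance (str : String) (out : String) : Decidable (Spec_encode_reserved str out) := by unfold Spec_encode_reserved; infer_instance

-- ===== CLAIM (what is proved, stated in full; the proofs are below) =====
def Claim_equal_encode_reserved : Prop := ∀ (str : String), Dom_encode_reserved str → Spec_encode_reserved str (encode_reserved str)

-- ===== LEMMAS AND PROOFS =====

-- single-character replace is a flatMap over the characters
theorem replace_go_single (o : Char) (n : List Char) :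
    ∀ (l acc : List Char) (fuel : Nat), l.length ≤ fuel →
      PySem.Chars.replace.go [o] n fuel l acc =
        acc.reverse ++ l.flatMap (fun c => if c = o then n else [c]) := by
  intro l
  induction l with
  | nil =>
      intro acc fuel _
      cases fuel <;> simp [PySem.Chars.replace.go]
  | cons c t ih =>
      intro acc fuel hfuel
      cases fuel with
      | zero => simp at hfuel
      | succ m =>
        by_cases hco : c = o
        · subst hco
          have : ([c].isPrefixOf (c :: t)) = true := by
            simp [List.isPrefixOf]
          simp only [PySem.Chars.replace.go, this, if_pos, List.length_cons,
            List.length_nil, List.drop_succ_cons, List.drop_zero]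
          rw [ih (n.reverse ++ acc) m (by simpa using Nat.lt_succ_iff.mp (Nat.lt_of_lt_of_le (by simp) hfuel))]
          simp
        · have : ([o].isPrefixOf (c :: t)) = false := by
            simp [List.isPrefixOf]; exact fun h => hco h.symm
          simp only [PySem.Chars.replace.go]
          rw [if_neg (by simp [this])]
          rw [ih (c :: acc) m (by simpa using Nat.lt_succ_iff.mp (Nat.lt_of_lt_of_le (by simp) hfuel))]
          simp [hco]

theorem replace_single (o : Char) (n s : List Char) :
    PySem.Chars.replace s [o] n = s.flatMap (fun c => if c = o then n else [c]) := by
  unfold PySem.Chars.replace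
  simp [replace_go_single o n s [] s.length (le_refl _)]

theorem join_nil_flatten (parts : List (List Char)) :
    PySem.Chars.join [] parts = parts.flatten := by
  unfold PySem.Chars.join
  induction parts with
  | nil => simp [List.intercalate]
  | cons p ps ih =>
      cases ps with
      | nil => simp [List.intercalate]
      | cons q qs =>
          simp [List.intercalate] at ih ⊢
          simpa using ih

-- ===== VERDICT (by name: the statement is the Claim_ definition above) =====
theorem encode_reserved_spec : Claim_equal_encode_reserved := by
  intro str _
  unfold Spec_encode_reserved encode_reserved encode_reserved_alt
  rw [← String.toList_inj]
  simp only [List.foldl, reduceIte]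
  rw [if_neg (by decide : ¬ (' ' = '&'))]
  rw [PySem.Str.toList_replace, PySem.Str.toList_replace, PySem.Str.toList_join]
  have h1 : ("&".toList) = ['&'] := rfl
  have h2 : ("%26".toList) = ['%','2','6'] := rfl
  have h3 : (" ".toList) = [' '] := rfl
  have h4 : ("%20".toList) = ['%','2','0'] := rfl
  have h5 : ("".toList) = ([] : List Char) := rfl
  rw [h1, h2, h3, h4, h5, replace_single, replace_single, join_nil_flatten]
  rw [List.flatMap_assoc]
  rw [List.map_map, ← List.flatMap_def]
  congr 1
  funext c
  by_cases hamp : c = '&'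
  · subst hamp; decide
  · by_cases hsp : c = ' '
    · subst hsp; decide
    · simp only [if_neg hamp, if_neg hsp, List.flatMap_cons, List.flatMap_nil,
        List.append_nil, Function.comp]
      have e1 : ('&' == c) = false := by simp [Ne.symm hamp]
      have e2 : (' ' == c) = false := by simp [Ne.symm hsp]
      simp [PySem.Dict.getD, PySem.Dict.insert, PySem.Dict.empty, PySem.Dict.get?,
        List.find?, e1, e2]
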